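-- pv_equiv track=rewrite | github.com/fast-iota/pacsys | pacsys/acnet/connection_tcp.py | _ator
-- ===== SOURCE A (Python) =====
-- def _ator(s: str) -> int:
--     """Convert string to RAD50 value."""
--
--     def char_to_index(c):
--         if "A" <= c <= "Z":
--             return ord(c) - ord("A") + 1
--         if "a" <= c <= "z":
--             return ord(c) - ord("a") + 1
--         if "0" <= c <= "9":
--             return ord(c) - ord("0") + 30
--         if c == "$":
--             return 27
--         if c == ".":
--             return 28
--         if c == "%":
--             return 29
--         return 0
--
--     first_bit = 0
--     second_bit = 0
--     s_len = len(s)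
--
--     for i in range(6):
--         c = s[i] if i < s_len else " "
--         if i < 3:
--             first_bit = first_bit * 40 + char_to_index(c)
--         else:
--             second_bit = second_bit * 40 + char_to_index(c)
--
--     return (second_bit << 16) | first_bit
-- ===== SOURCE B (Python) =====
-- RAD50 = {c: i for i, c in enumerate(" ABCDEFGHIJKLMNOPQRSTUVWXYZ$.%0123456789")}
-- WEIGHTS = (1600, 40, 1, 1600 << 16, 40 << 16, 1 << 16)
--
--
-- def _ator(s: str) -> int:
--     """Convert string to RAD50 value."""
--     # Each RAD50 code occupies a fixed place value; the low word is < 2**16,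
--     # so A's (hi << 16) | lo is the same as this plain weighted sum.
--     return sum(RAD50.get(c.upper(), 0) * w for c, w in zip(s, WEIGHTS))
-- ===== Notes on version B (the rewrite author's own statement) =====
-- stated objective: alternative
-- what changed: Replaces A's interleaved six-step accumulator loop with base-40 Horner packing and a final shift/OR by a single weighted sum: each of the first six characters (zip truncates, short strings need no padding since blank's code is 0) contributes its RAD50 dict code times a precomputed place value (1600, 40, 1, 1600<<16, 40<<16, 1<<16); the OR equals addition because the low word is below 2^16.
import Mathlib
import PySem

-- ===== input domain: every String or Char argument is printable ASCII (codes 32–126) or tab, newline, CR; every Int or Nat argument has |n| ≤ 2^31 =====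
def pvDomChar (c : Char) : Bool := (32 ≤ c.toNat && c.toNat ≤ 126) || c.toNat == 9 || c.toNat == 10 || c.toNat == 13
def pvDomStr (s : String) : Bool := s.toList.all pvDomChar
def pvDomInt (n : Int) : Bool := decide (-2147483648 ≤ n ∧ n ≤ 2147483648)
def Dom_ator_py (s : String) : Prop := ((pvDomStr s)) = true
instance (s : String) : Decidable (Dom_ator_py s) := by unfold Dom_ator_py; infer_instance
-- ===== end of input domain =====

-- B replaces A's interleaved accumulator loop and shift/OR packing by a single weighted sum
-- (code of each of the first six chars times its fixed place value); alternative decomposition, same cost.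

-- ===== PORT A =====
def atorCharToIndex (c : Char) : Int :=
  if 'A' ≤ c ∧ c ≤ 'Z' then (c.toNat : Int) - ('A'.toNat : Int) + 1
  else if 'a' ≤ c ∧ c ≤ 'z' then (c.toNat : Int) - ('a'.toNat : Int) + 1
  else if '0' ≤ c ∧ c ≤ '9' then (c.toNat : Int) - ('0'.toNat : Int) + 30
  else if c = '$' then 27
  else if c = '.' then 28
  else if c = '%' then 29
  else 0

def ator_py (s : String) : Int :=
  let sLen : Int := (s.toList.length : Int)
  let p := (PySem.List.pyRange 0 6 1).foldl (fun (p : Int × Int) i =>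
    let c : Char := if i < sLen then (PySem.List.pyGet? s.toList i).getD ' ' else ' '
    if i < 3 then (p.1 * 40 + atorCharToIndex c, p.2)
    else (p.1, p.2 * 40 + atorCharToIndex c)) ((0 : Int), (0 : Int))
  PySem.Int.bor (p.2 <<< (16 : Nat)) p.1

-- ===== PORT B =====
-- RAD50 = {c: i for i, c in enumerate(" ABCDEFGHIJKLMNOPQRSTUVWXYZ$.%0123456789")}
def atorRad50 : PySem.Dict Char Int :=
  (PySem.List.enumerate " ABCDEFGHIJKLMNOPQRSTUVWXYZ$.%0123456789".toList 0).foldl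
    (fun d p => d.insert p.2 p.1) PySem.Dict.empty

-- WEIGHTS = (1600, 40, 1, 1600 << 16, 40 << 16, 1 << 16)
def atorWeights : List Int :=
  [1600, 40, 1, 1600 <<< (16 : Nat), 40 <<< (16 : Nat), 1 <<< (16 : Nat)]

def ator_py_alt (s : String) : Int :=
  ((s.toList.zip atorWeights).map
    (fun p => (atorRad50.getD (PySem.Chars.upperChar p.1) 0) * p.2)).sum

-- ===== PRECONDITION & SPEC =====
def Spec_ator_py (s : String) (out : Int) : Prop := out = ator_py_alt s
instance (s : String) (out : Int) : Decidable (Spec_ator_py s out) := by unfold Spec_ator_py; infer_instance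

-- ===== CLAIM (what is proved, stated in full; the proofs are below) =====
def Claim_equal_ator_py : Prop := ∀ (s : String), Dom_ator_py s → Spec_ator_py s (ator_py s)

-- ===== LEMMAS AND PROOFS =====

-- B's per-character code, named for the proofs
def atorCode (c : Char) : Int := atorRad50.getD (PySem.Chars.upperChar c) 0

set_option maxRecDepth 8000 in
-- dict lookup agrees with A's char_to_index on every domain character (checked code by code)
theorem code_eq_aux : ∀ n ∈ List.range 127, pvDomChar (Char.ofNat n) = true →
    atorCode (Char.ofNat n) = atorCharToIndex (Char.ofNat n) := by decide

theorem code_eq (c : Char) (h : pvDomChar c = true) : atorCode c = atorCharToIndex c := by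
  have hlt : c.toNat < 127 := by
    simp only [pvDomChar, Bool.or_eq_true, Bool.and_eq_true, decide_eq_true_eq, beq_iff_eq] at h
    omega
  have := code_eq_aux c.toNat (List.mem_range.mpr hlt)
  rw [Char.ofNat_toNat] at this
  exact this h

set_option maxRecDepth 8000 in
theorem idx_bounds_aux : ∀ n ∈ List.range 127,
    0 ≤ atorCharToIndex (Char.ofNat n) ∧ atorCharToIndex (Char.ofNat n) ≤ 39 := by decide

theorem idx_bounds (c : Char) (h : pvDomChar c = true) :
    0 ≤ atorCharToIndex c ∧ atorCharToIndex c ≤ 39 := by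
  have hlt : c.toNat < 127 := by
    simp only [pvDomChar, Bool.or_eq_true, Bool.and_eq_true, decide_eq_true_eq, beq_iff_eq] at h
    omega
  have := idx_bounds_aux c.toNat (List.mem_range.mpr hlt)
  rwa [Char.ofNat_toNat] at this

set_option maxRecDepth 8000 in
theorem code_space' : atorRad50.getD (PySem.Chars.upperChar ' ') 0 = 0 := by decide

theorem wlist : atorWeights = [1600, 40, 1, 104857600, 2621440, 65536] := by decide

-- the low word is below 2^16, so A's OR is plain addition
theorem bor_shift16 (a b : Int) (ha : 0 ≤ a) (hb0 : 0 ≤ b) (hb : b < 65536) :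
    PySem.Int.bor (a <<< (16 : Nat)) b = a * 65536 + b := by
  obtain ⟨n, rfl⟩ := Int.eq_ofNat_of_zero_le ha
  obtain ⟨m, rfl⟩ := Int.eq_ofNat_of_zero_le hb0
  rw [← Int.natCast_shiftLeft, PySem.Int.bor_natCast]
  have hm : m < 2 ^ 16 := by exact_mod_cast hb
  have key : (n <<< 16) ||| m = 2 ^ 16 * n + m := by
    apply Nat.eq_of_testBit_eq; intro j
    rw [Nat.testBit_lor, Nat.testBit_shiftLeft, Nat.testBit_two_pow_mul_add n hm j]
    by_cases hj : 16 ≤ j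
    · simp [hj, Nat.testBit_lt_two_pow (lt_of_lt_of_le hm (Nat.pow_le_pow_right (by norm_num) hj))]
    · simp [hj, Nat.lt_of_not_le hj]
  rw [key]; push_cast; ring

-- the character A reads at index i is getD i ' '
theorem aChar (cs : List Char) (i : Int) (h0 : 0 ≤ i) :
    (if i < (cs.length : Int) then (PySem.List.pyGet? cs i).getD ' ' else ' ')
      = cs.getD i.toNat ' ' := by
  obtain ⟨n, rfl⟩ : ∃ n : Nat, i = (n : Int) := ⟨i.toNat, by omega⟩
  by_cases h : n < cs.length
  · have hc : ((n : Nat) : Int) < (cs.length : Int) := by exact_mod_cast h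
    simp [hc, List.getD_eq_getElem?_getD]
  · have hc : ¬ ((n : Nat) : Int) < (cs.length : Int) := by exact_mod_cast h
    simp [hc, List.getD_eq_getElem?_getD, List.getElem?_eq_none (show cs.length ≤ n by omega)]

-- B's zip-map-sum written out in terms of getD (missing positions read ' ', whose code is 0)
theorem zipB (cs : List Char) :
    ((cs.zip atorWeights).map (fun p => (atorRad50.getD (PySem.Chars.upperChar p.1) 0) * p.2)).sum
      = atorCode (cs.getD 0 ' ') * 1600 + atorCode (cs.getD 1 ' ') * 40
        + atorCode (cs.getD 2 ' ') * 1 + atorCode (cs.getD 3 ' ') * 104857600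
        + atorCode (cs.getD 4 ' ') * 2621440 + atorCode (cs.getD 5 ' ') * 65536 := by
  rcases cs with _ | ⟨a, _ | ⟨b, _ | ⟨c, _ | ⟨d, _ | ⟨e, _ | ⟨f, t⟩⟩⟩⟩⟩⟩ <;>
    rw [wlist] <;>
    simp only [atorCode, List.zip, List.zipWith, List.map, List.sum_cons, List.sum_nil,
      List.getD, List.getElem?_cons_zero, List.getElem?_cons_succ, List.getElem?_nil,
      Option.getD_some, Option.getD_none] <;>
    (try simp only [code_space']) <;> norm_num <;> try ring

-- ===== VERDICT (by name: the statement is the Claim_ definition above) =====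
theorem ator_py_spec : Claim_equal_ator_py := by
  unfold Claim_equal_ator_py
  intro s hdom
  unfold Spec_ator_py ator_py ator_py_alt
  have hall : ∀ c ∈ s.toList, pvDomChar c = true := by
    simpa [Dom_ator_py, pvDomStr, List.all_eq_true] using hdom
  set cs : List Char := s.toList with hcs
  have hd : ∀ j : Nat, pvDomChar (cs.getD j ' ') = true := by
    intro j
    by_cases h : j < cs.length
    · rw [List.getD_eq_getElem?_getD, List.getElem?_eq_getElem h]
      exact hall _ (List.getElem_mem h)
    · rw [List.getD_eq_default _ _ (by omega)]; decide
  have hrange : PySem.List.pyRange 0 6 1 = [0, 1, 2, 3, 4, 5] := by decide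
  rw [hrange, zipB cs]
  simp only [List.foldl, Int.reduceLT, reduceIte]
  rw [aChar cs 0 (by norm_num), aChar cs 1 (by norm_num), aChar cs 2 (by norm_num),
    aChar cs 3 (by norm_num), aChar cs 4 (by norm_num), aChar cs 5 (by norm_num)]
  simp only [show (0:Int).toNat = 0 from rfl, show (1:Int).toNat = 1 from rfl,
    show (2:Int).toNat = 2 from rfl, show (3:Int).toNat = 3 from rfl,
    show (4:Int).toNat = 4 from rfl, show (5:Int).toNat = 5 from rfl]
  rw [code_eq _ (hd 0), code_eq _ (hd 1), code_eq _ (hd 2),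
    code_eq _ (hd 3), code_eq _ (hd 4), code_eq _ (hd 5)]
  obtain ⟨l0, u0⟩ := idx_bounds _ (hd 0)
  obtain ⟨l1, u1⟩ := idx_bounds _ (hd 1)
  obtain ⟨l2, u2⟩ := idx_bounds _ (hd 2)
  obtain ⟨l3, u3⟩ := idx_bounds _ (hd 3)
  obtain ⟨l4, u4⟩ := idx_bounds _ (hd 4)
  obtain ⟨l5, u5⟩ := idx_bounds _ (hd 5)
  rw [bor_shift16 _ _ (by nlinarith) (by nlinarith) (by nlinarith)]
  ring
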